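-- pv_equiv track=rewrite | github.com/itsanti/skillsmart | algo01/algo_01_24.py | search_siq
-- ===== SOURCE A (Python) =====
-- def search_siq(a):
--     sp = [None, None]
--     for ix, e in enumerate(a[:-1]):
--         if a[ix] > a[ix + 1] and sp[0] is None:
--             sp[0] = ix
--             sp[1] = ix + 1
--         elif a[ix] > a[ix + 1]:
--             sp[1] = ix + 1
--         elif a[ix] < a[ix + 1] and sp[0] is not None:
--             return sp
--     return sp
-- ===== SOURCE B (Python) =====
-- def search_siq(a):
--     pairs = list(enumerate(zip(a, a[1:])))
--     down = [i for i, (x, y) in pairs if x > y]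
--     if not down:
--         return [None, None]
--     start = down[0]
--     up = [i for i, (x, y) in pairs if x < y and i > start]
--     stop = up[0] if up else len(a)
--     end = [i for i in down if i < stop][-1] + 1
--     return [start, end]
-- ===== Notes on version B (the rewrite author's own statement) =====
-- stated objective: alternative
-- what changed: Replaces A's stateful flag-carrying scan with a declarative index-set computation: build the list of descent indices and of ascent indices after the first descent once, then read start, stop and end off those lists by head/last arithmetic.
import Mathlib
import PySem

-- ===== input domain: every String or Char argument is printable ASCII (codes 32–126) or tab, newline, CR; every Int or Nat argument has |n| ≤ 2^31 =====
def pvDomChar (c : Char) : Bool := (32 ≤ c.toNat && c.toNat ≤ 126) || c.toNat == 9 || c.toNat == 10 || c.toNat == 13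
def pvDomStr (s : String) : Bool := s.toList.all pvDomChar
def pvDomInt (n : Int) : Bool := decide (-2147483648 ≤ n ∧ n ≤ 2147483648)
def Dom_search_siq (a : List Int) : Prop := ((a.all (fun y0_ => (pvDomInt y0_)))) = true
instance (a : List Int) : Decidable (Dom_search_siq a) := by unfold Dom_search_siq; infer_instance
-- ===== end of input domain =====

-- B replaces A's stateful flag-carrying scan by a declarative index-set computation
-- (descent/ascent index lists built once, start/stop/end read off by head/max); same cost.

-- ===== PORT A =====
-- A's loop over enumerate(a[:-1]) compares adjacent pairs carrying sp = [sp0, sp1];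
-- the early `return sp` ends the recursion.
def searchSiqLoopA : List Int → Int → Option Int → Option Int → List (Option Int)
  | x :: y :: rest, ix, sp0, sp1 =>
    if x > y ∧ sp0 = none then
      searchSiqLoopA (y :: rest) (ix + 1) (some ix) (some (ix + 1))
    else if x > y then
      searchSiqLoopA (y :: rest) (ix + 1) sp0 (some (ix + 1))
    else if x < y ∧ sp0 ≠ none then
      [sp0, sp1]
    else
      searchSiqLoopA (y :: rest) (ix + 1) sp0 sp1
  | _, _, sp0, sp1 => [sp0, sp1]

def search_siq (a : List Int) : List (Option Int) :=
  searchSiqLoopA a 0 none none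

-- ===== PORT B =====
-- pairs = list(enumerate(zip(a, a[1:]))); zip(a, a[1:]) = a.zip a.tail (a[1:] is slice_from_one = tail).
-- down/up are the list comprehensions; [...][-1] is PySem.List.pyGet? ... (-1)
-- (Python raises IndexError on an empty list there; that branch returns [] and is unreachable: down's head is < stop).
def search_siq_alt (a : List Int) : List (Option Int) :=
  let pairs := PySem.List.enumerate (a.zip a.tail) 0
  let down := (pairs.filter (fun p => decide (p.2.1 > p.2.2))).map (fun p => p.1)
  match down with
  | [] => [none, none]
  | start :: _ =>
    let up := (pairs.filter (fun p => decide (p.2.1 < p.2.2) && decide (start < p.1))).map (fun p => p.1)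
    let stop := match up with | [] => (a.length : Int) | u :: _ => u
    match PySem.List.pyGet? (down.filter (fun i => decide (i < stop))) (-1) with
    | some m => [some start, some (m + 1)]
    | none => []

-- ===== PRECONDITION & SPEC =====
def Spec_search_siq (a : List Int) (out : List (Option Int)) : Prop := out = search_siq_alt a
instance (a : List Int) (out : List (Option Int)) : Decidable (Spec_search_siq a out) := by unfold Spec_search_siq; infer_instance

-- ===== CLAIM =====
def Claim_equal_search_siq : Prop := ∀ (a : List Int), Dom_search_siq a → Spec_search_siq a (search_siq a)

-- ===== LEMMAS AND PROOFS =====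

-- descent indices, ascent indices, ascent indices after s, and the stop bound, enumerated from i
def dns (l : List Int) (i : Int) : List Int :=
  ((PySem.List.enumerate (l.zip l.tail) i).filter (fun p => decide (p.2.1 > p.2.2))).map (fun p => p.1)
def ups (l : List Int) (i : Int) : List Int :=
  ((PySem.List.enumerate (l.zip l.tail) i).filter (fun p => decide (p.2.1 < p.2.2))).map (fun p => p.1)
def upsA (l : List Int) (i s : Int) : List Int :=
  ((PySem.List.enumerate (l.zip l.tail) i).filter
    (fun p => decide (p.2.1 < p.2.2) && decide (s < p.1))).map (fun p => p.1)
def stopD (l : List Int) (i : Int) : Int :=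
  match ups l i with | [] => i + (l.length : Int) | u :: _ => u
def stopA (l : List Int) (i s : Int) : Int :=
  match upsA l i s with | [] => i + (l.length : Int) | u :: _ => u

theorem zp_cons (x y : Int) (rest : List Int) :
    (x :: y :: rest).zip (x :: y :: rest).tail = (x, y) :: ((y :: rest).zip (y :: rest).tail) := by
  simp [List.zip]

theorem enum_fst_ge {α : Type} (l : List α) (i : Int) :
    ∀ p ∈ PySem.List.enumerate l i, i ≤ p.1 := by
  intro p hp
  rcases (PySem.List.mem_enumerate_iff l i p).1 hp with ⟨k, hk, rfl⟩
  omega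

theorem mem_dns_ge (l : List Int) (i : Int) : ∀ m ∈ dns l i, i ≤ m := by
  intro m hm
  rcases List.mem_map.1 hm with ⟨p, hp, rfl⟩
  exact enum_fst_ge _ i p (List.mem_filter.1 hp).1

theorem mem_ups_ge (l : List Int) (i : Int) : ∀ m ∈ ups l i, i ≤ m := by
  intro m hm
  rcases List.mem_map.1 hm with ⟨p, hp, rfl⟩
  exact enum_fst_ge _ i p (List.mem_filter.1 hp).1

-- once s < i, the "i > start" conjunct is always true
theorem upsA_eq_ups (l : List Int) (i s : Int) (h : s < i) : upsA l i s = ups l i := by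
  unfold upsA ups
  congr 1
  apply List.filter_congr
  intro p hp
  have h2 := enum_fst_ge _ i p hp
  have h3 : decide (s < p.1) = true := by simp; omega
  simp [h3]

theorem stopD_ge (l : List Int) (i : Int) : i ≤ stopD l i := by
  unfold stopD
  cases hu : ups l i with
  | nil => simp
  | cons u t => exact mem_ups_ge l i u (by rw [hu]; exact List.mem_cons_self)

-- structural steps
theorem dns_cons (x y : Int) (rest : List Int) (i : Int) :
    dns (x :: y :: rest) i =
      if x > y then i :: dns (y :: rest) (i + 1) else dns (y :: rest) (i + 1) := by
  unfold dns
  rw [zp_cons, PySem.List.enumerate_cons]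
  by_cases h : x > y <;> simp [h]

theorem ups_cons (x y : Int) (rest : List Int) (i : Int) :
    ups (x :: y :: rest) i =
      if x < y then i :: ups (y :: rest) (i + 1) else ups (y :: rest) (i + 1) := by
  unfold ups
  rw [zp_cons, PySem.List.enumerate_cons]
  by_cases h : x < y <;> simp [h]

theorem upsA_cons_skip (x y : Int) (rest : List Int) (i s : Int) (h : ¬ s < i) :
    upsA (x :: y :: rest) i s = upsA (y :: rest) (i + 1) s := by
  unfold upsA
  rw [zp_cons, PySem.List.enumerate_cons]
  simp [h]

theorem stopD_cons_noasc (x y : Int) (rest : List Int) (i : Int) (h : ¬ x < y) :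
    stopD (x :: y :: rest) i = stopD (y :: rest) (i + 1) := by
  unfold stopD
  rw [ups_cons, if_neg h]
  cases ups (y :: rest) (i + 1) with
  | nil => simp only [List.length_cons]; push_cast; ring
  | cons u t => rfl

theorem dns_pairwise (l : List Int) (i : Int) : (dns l i).Pairwise (· < ·) := by
  unfold dns
  exact ((PySem.List.pairwise_lt_enumerate (l.zip l.tail) i).sublist
    (List.filter_sublist ..)).map _ (fun _ _ h => h)

-- in a ≤-sorted nonempty list the running max from the head is the last element
theorem foldl_max_getLast : ∀ (t : List Int) (acc : Int),
    List.Pairwise (· ≤ ·) (acc :: t) → (acc :: t).getLast (by simp) = t.foldl max acc := by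
  intro t
  induction t with
  | nil => intro acc _; simp
  | cons u t' ih =>
    intro acc hpw
    rcases List.pairwise_cons.1 hpw with ⟨hle, hpw'⟩
    have h1 : max acc u = u := max_eq_right (hle u List.mem_cons_self)
    rw [List.getLast_cons (by simp), ih u hpw', List.foldl_cons, h1]

-- declarative characterisation of A's extend phase (sp already set to [s, e])
theorem extend_char (l : List Int) :
    ∀ (j s e : Int), e ≤ j + 1 →
    searchSiqLoopA l j (some s) (some e) =
      [some s, some (((dns l j).filter (fun m => decide (m < stopD l j))).foldl max (e - 1) + 1)] := by
  induction l with
  | nil =>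
    intro j s e _
    simp only [searchSiqLoopA, dns]
    simp
  | cons x t ih =>
    intro j s e he
    cases t with
    | nil =>
      simp only [searchSiqLoopA, dns]
      simp
    | cons y rest =>
      rw [searchSiqLoopA, dns_cons]
      by_cases hgt : x > y
      · rw [if_neg (by simp), if_pos hgt, if_pos hgt,
          stopD_cons_noasc x y rest j (by omega), ih (j + 1) s (j + 1) (by omega)]
        have hjlt : j < stopD (y :: rest) (j + 1) := by
          have := stopD_ge (y :: rest) (j + 1); omega
        rw [List.filter_cons]
        rw [if_pos (by simpa using hjlt), List.foldl_cons]
        have h2 : max (e - 1) j = j := by omega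
        have h1 : j + 1 - 1 = j := by omega
        rw [h2, h1]
      · rw [if_neg (by simp [hgt]), if_neg hgt, if_neg hgt]
        by_cases hlt : x < y
        · rw [if_pos ⟨hlt, by simp⟩]
          have hstop : stopD (x :: y :: rest) j = j := by
            unfold stopD
            rw [ups_cons, if_pos hlt]
          rw [hstop]
          have hfil : (dns (y :: rest) (j + 1)).filter (fun m => decide (m < j)) = [] := by
            rw [List.filter_eq_nil_iff]
            intro m hm
            have := mem_dns_ge (y :: rest) (j + 1) m hm
            simp; omega
          rw [hfil]
          simp
        · rw [if_neg (by simp [hlt]), stopD_cons_noasc x y rest j hlt,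
            ih (j + 1) s e (by omega)]

-- B's body with the enumeration starting at an arbitrary index i
def altFrom (l : List Int) (i : Int) : List (Option Int) :=
  match dns l i with
  | [] => [none, none]
  | start :: _ =>
    match PySem.List.pyGet? ((dns l i).filter (fun m => decide (m < stopA l i start))) (-1) with
    | some m => [some start, some (m + 1)]
    | none => []

theorem alt_eq_altFrom (a : List Int) : search_siq_alt a = altFrom a 0 := by
  unfold search_siq_alt altFrom dns stopA upsA
  simp

theorem altFrom_step (x y : Int) (rest : List Int) (i : Int) (h : ¬ x > y) :
    altFrom (x :: y :: rest) i = altFrom (y :: rest) (i + 1) := by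
  unfold altFrom
  rw [dns_cons, if_neg h]
  cases hd : dns (y :: rest) (i + 1) with
  | nil => rfl
  | cons s t =>
    have hs : i + 1 ≤ s :=
      mem_dns_ge (y :: rest) (i + 1) s (by rw [hd]; exact List.mem_cons_self)
    have hstop : stopA (x :: y :: rest) i s = stopA (y :: rest) (i + 1) s := by
      unfold stopA
      rw [upsA_cons_skip x y rest i s (by omega)]
      cases upsA (y :: rest) (i + 1) s with
      | nil => simp only [List.length_cons]; push_cast; ring
      | cons u t' => rfl
    dsimp only
    rw [hstop]

theorem loopA_none_eq_altFrom (l : List Int) :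
    ∀ (i : Int), searchSiqLoopA l i none none = altFrom l i := by
  induction l with
  | nil => intro i; rfl
  | cons x t ih =>
    intro i
    cases t with
    | nil => rfl
    | cons y rest =>
      rw [searchSiqLoopA]
      by_cases hgt : x > y
      · rw [if_pos ⟨hgt, rfl⟩, extend_char (y :: rest) (i + 1) i (i + 1) (by omega)]
        unfold altFrom
        rw [dns_cons, if_pos hgt]
        dsimp only
        have hstop : stopA (x :: y :: rest) i i = stopD (y :: rest) (i + 1) := by
          unfold stopA stopD
          rw [upsA_cons_skip x y rest i i (by omega),
            upsA_eq_ups (y :: rest) (i + 1) i (by omega)]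
          cases ups (y :: rest) (i + 1) with
          | nil => simp only [List.length_cons]; push_cast; ring
          | cons u t' => rfl
        rw [hstop, List.filter_cons]
        have hjlt : i < stopD (y :: rest) (i + 1) := by
          have := stopD_ge (y :: rest) (i + 1); omega
        rw [if_pos (by simpa using hjlt)]
        generalize hT : (dns (y :: rest) (i + 1)).filter
            (fun m => decide (m < stopD (y :: rest) (i + 1))) = t
        have hpw : List.Pairwise (· ≤ ·) (i :: t) := by
          refine List.pairwise_cons.2 ⟨?_, ?_⟩
          · intro m hm
            have h1 := mem_dns_ge (y :: rest) (i + 1) m (List.mem_of_mem_filter (hT ▸ hm))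
            omega
          · exact (hT ▸ ((dns_pairwise (y :: rest) (i + 1)).sublist
              (List.filter_sublist ..))).imp (fun h => le_of_lt h)
        have hget : PySem.List.pyGet? (i :: t) (-1) = some (t.foldl max i) := by
          rw [PySem.List.pyGet?_neg_one,
            List.getLast?_eq_some_getLast (l := i :: t) (by simp), foldl_max_getLast t i hpw]
        rw [hget]
        have h1 : i + 1 - 1 = i := by omega
        rw [h1]
      · rw [if_neg (by simp [hgt]), if_neg hgt, if_neg (by simp), ih (i + 1),
          altFrom_step x y rest i hgt]

-- ===== VERDICT =====
theorem search_siq_spec : Claim_equal_search_siq := by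
  intro a _
  unfold Spec_search_siq
  rw [search_siq, alt_eq_altFrom, loopA_none_eq_altFrom]
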